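-- pv_equiv track=rewrite | github.com/ALOTAIBIH/Pac-Man | myTeam.py | getBestActions
-- ===== SOURCE A (Python) =====
-- import copy
--
-- def getBestActions(evaluation, all_actions):
--   actions = copy.deepcopy(all_actions)
--   eval_list = []
--   for action in actions:
--     eval_list.append(evaluation[action])
--
--   max_length = max([len(_list) for _list in eval_list])
--   min_length = min([len(_list) for _list in eval_list])
--
--   index = 0
--
--   while index < max_length and len(eval_list) > 1:
--     min_indices = []
--     for i in range(len(eval_list)):
--       _list = eval_list[i]
--       if len(_list) == index:
--         min_indices.append(i)
--     for rem_index in reversed(min_indices):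
--       eval_list.pop(rem_index)
--       actions.pop(rem_index)
--     max_val = max([_list[index] for _list in eval_list])
--     min_indices = []
--     for i in range(len(eval_list)):
--       _list = eval_list[i]
--       if _list[index] < max_val:
--         min_indices.append(i)
--     for rem_index in reversed(min_indices):
--       eval_list.pop(rem_index)
--       actions.pop(rem_index)
--     index += 1
--     max_length = max([len(_list) for _list in eval_list])
--
--   return actions
-- ===== SOURCE B (Python) =====
-- import copy
-- from functools import cmp_to_key
--
-- def getBestActions(evaluation, all_actions):
--   def cmp(u, v):
--     for x, y in zip(u, v):
--       if x != y:
--         return -1 if x < y else 1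
--     if len(u) == len(v):
--       return 0
--     return -1 if len(u) < len(v) else 1
--   best = max((evaluation[a] for a in all_actions), key=cmp_to_key(cmp))
--   return [copy.deepcopy(a) for a in all_actions if evaluation[a] == best]
-- ===== Notes on version B (the rewrite author's own statement) =====
-- stated objective: simpler
-- what changed: Replaces A's destructive round-by-round column elimination (repeated index-list building and reversed pops) with a single lexicographic max over the evaluation vectors (longer wins on an equal prefix) followed by one filter pass keeping the actions whose vector equals that max.
import Mathlib
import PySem

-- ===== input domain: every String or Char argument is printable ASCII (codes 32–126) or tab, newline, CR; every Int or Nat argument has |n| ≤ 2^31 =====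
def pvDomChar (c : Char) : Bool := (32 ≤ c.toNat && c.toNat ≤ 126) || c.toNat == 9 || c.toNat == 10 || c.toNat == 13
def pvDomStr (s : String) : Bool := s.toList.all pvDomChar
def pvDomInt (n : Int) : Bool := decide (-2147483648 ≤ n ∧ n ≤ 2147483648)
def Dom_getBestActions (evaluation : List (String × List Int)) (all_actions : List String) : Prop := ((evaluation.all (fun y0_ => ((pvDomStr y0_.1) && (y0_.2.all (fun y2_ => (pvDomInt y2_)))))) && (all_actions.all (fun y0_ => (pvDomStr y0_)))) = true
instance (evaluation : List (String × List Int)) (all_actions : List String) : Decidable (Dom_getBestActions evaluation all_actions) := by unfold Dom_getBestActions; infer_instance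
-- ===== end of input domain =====

-- B replaces A's iterative column-wise elimination loop by a single lexicographic
-- max over the evaluation vectors followed by one filter pass (objective: simpler).
-- A pops from its local lists only; neither program mutates its arguments observably.

-- ===== PORT A =====
-- A keeps two parallel lists (actions, eval_list) and pops both at the same indices;
-- the port carries them as one list of (action, eval) pairs holding the same values.
-- `xs.pop(i)` for an in-range index:
def pvPopAt {α : Type} (xs : List α) (i : Nat) : List α := xs.take i ++ xs.drop (i + 1)

-- `max([len(l) for l in eval_list])`; Python raises on an empty list (excluded by
-- Pre_ at the top; inside the loop eval_list is never empty), where this returns 0.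
def pvMaxLen (ps : List (String × List Int)) : Nat :=
  ps.foldl (fun m p => Nat.max m p.2.length) 0

-- `max(list_of_ints)`; Python raises on [] (unreachable in A's loop), here 0.
def pvMaxInt : List Int → Int
  | [] => 0
  | h :: t => t.foldl max h

-- `min_indices` built by `for i in range(len(eval_list)): if P(eval_list[i]) …`
def pvIdxs (ps : List (String × List Int)) (P : String × List Int → Bool) : List Nat :=
  (List.range ps.length).filter (fun i => P (ps.getD i ("", [])))

-- `for rem_index in reversed(min_indices): pop(rem_index)`
def pvPopRev (ps : List (String × List Int)) (idxs : List Nat) : List (String × List Int) :=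
  idxs.reverse.foldl pvPopAt ps

-- the while loop; fuel = the initial max_length bounds the iteration count
-- (index grows by 1 per round and the loop needs index < max_length ≤ initial max_length)
def pvLoopA : Nat → Nat → List (String × List Int) → List String
  | 0, _, ps => ps.map Prod.fst
  | fuel + 1, index, ps =>
    if index < pvMaxLen ps ∧ 1 < ps.length then
      let ps1 := pvPopRev ps (pvIdxs ps (fun p => p.2.length == index))
      let maxVal := pvMaxInt (ps1.map (fun p => p.2.getD index 0))
      let ps2 := pvPopRev ps1 (pvIdxs ps1 (fun p => p.2.getD index 0 < maxVal))
      pvLoopA fuel (index + 1) ps2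
    else ps.map Prod.fst

-- dict lookup (first match); used by both ports
def pvLookup (d : List (String × List Int)) (k : String) : Option (List Int) :=
  (d.find? (fun p => p.1 == k)).map (·.2)

def getBestActions (evaluation : List (String × List Int)) (all_actions : List String) : List String :=
  -- evaluation[action]; a missing key (KeyError) is excluded by Pre_
  let ps := all_actions.map (fun a => (a, (pvLookup evaluation a).getD []))
  pvLoopA (pvMaxLen ps) 0 ps

-- ===== PORT B =====
-- the comparator cmp of Source B: walk the common prefix, then compare lengths
def pvCmp : List Int → List Int → Ordering
  | [], [] => .eq
  | [], _ :: _ => .lt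
  | _ :: _, [] => .gt
  | x :: u, y :: v => if x < y then .lt else if y < x then .gt else pvCmp u v

-- max(gen, key=cmp_to_key(cmp)): first maximal element (replace only on strictly greater)
def pvBestFold (h : List Int) (t : List (List Int)) : List Int :=
  t.foldl (fun acc v => if pvCmp v acc = .gt then v else acc) h

def getBestActions_alt (evaluation : List (String × List Int)) (all_actions : List String) : List String :=
  match all_actions.map (fun a => (pvLookup evaluation a).getD []) with
  | [] => []  -- Python's max raises ValueError here; excluded by Pre_
  | h :: t =>
    let best := pvBestFold h t
    all_actions.filter (fun a => (pvLookup evaluation a).getD [] == best)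

-- ===== PRECONDITION & SPEC =====
-- A raises ValueError on an empty action list and KeyError on an action missing
-- from evaluation; Pre_ excludes exactly those inputs.
def Pre_getBestActions (evaluation : List (String × List Int)) (all_actions : List String) : Prop :=
  all_actions ≠ [] ∧ ∀ a ∈ all_actions, (pvLookup evaluation a).isSome

instance (evaluation : List (String × List Int)) (all_actions : List String) : Decidable (Pre_getBestActions evaluation all_actions) := by unfold Pre_getBestActions; infer_instance

def pvWitness_getBestActions : (List (String × List Int)) × List String :=
  ([("n", [1, 2]), ("s", [1]), ("w", [0, 5])], ["n", "s", "w"])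

def Spec_getBestActions (evaluation : List (String × List Int)) (all_actions : List String) (out : List String) : Prop := out = getBestActions_alt evaluation all_actions
instance (evaluation : List (String × List Int)) (all_actions : List String) (out : List String) : Decidable (Spec_getBestActions evaluation all_actions out) := by unfold Spec_getBestActions; infer_instance

-- ===== CLAIM (what is proved, stated in full; the proofs are below) =====
def Claim_equal_getBestActions : Prop := ∀ (evaluation : List (String × List Int)) (all_actions : List String), Dom_getBestActions evaluation all_actions → Pre_getBestActions evaluation all_actions → Spec_getBestActions evaluation all_actions (getBestActions evaluation all_actions)

-- ===== LEMMAS AND PROOFS =====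

-- ---- comparator facts ----
theorem pvCmp_refl (u : List Int) : pvCmp u u = .eq := by
  induction u with
  | nil => rfl
  | cons x u ih => simp [pvCmp, ih]

theorem pvCmp_eq_iff (u v : List Int) : pvCmp u v = .eq ↔ u = v := by
  constructor
  · intro h
    induction u generalizing v with
    | nil => cases v with | nil => rfl | cons y v => simp [pvCmp] at h
    | cons x u ih =>
      cases v with
      | nil => simp [pvCmp] at h
      | cons y v =>
        simp only [pvCmp] at h
        split_ifs at h with h1 h2
        have : x = y := by omega
        subst this
        exact congrArg (x :: ·) (ih _ h)
  · rintro rfl; exact pvCmp_refl u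

theorem pvCmp_swap (u v : List Int) : pvCmp u v = .gt ↔ pvCmp v u = .lt := by
  induction u generalizing v with
  | nil => cases v <;> simp [pvCmp]
  | cons x u ih =>
    cases v with
    | nil => simp [pvCmp]
    | cons y v =>
      simp only [pvCmp]
      split_ifs with h1 h2 <;> simp_all <;> omega

theorem pvCmp_trans_gt {a b c : List Int} (h1 : pvCmp a b = .gt) (h2 : pvCmp b c = .gt) :
    pvCmp a c = .gt := by
  induction a generalizing b c with
  | nil => cases b <;> simp [pvCmp] at h1
  | cons x a ih =>
    cases b with
    | nil => cases c <;> simp [pvCmp] at h2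
    | cons y b =>
      cases c with
      | nil => simp [pvCmp]
      | cons z c =>
        simp only [pvCmp] at h1 h2 ⊢
        split_ifs at h1 h2 ⊢ with h h' <;> try omega
        all_goals first
          | rfl
          | (exfalso; omega)
          | (exact ih h1 h2)

-- equal prefixes of length k: comparison continues on the tails
theorem pvCmp_drop (k : Nat) (u v : List Int) (hu : k ≤ u.length) (hv : k ≤ v.length)
    (h : u.take k = v.take k) : pvCmp u v = pvCmp (u.drop k) (v.drop k) := by
  induction k generalizing u v with
  | zero => simp
  | succ k ih =>
    cases u with
    | nil => simp at hu
    | cons x u =>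
      cases v with
      | nil => simp at hv
      | cons y v =>
        simp only [List.take_succ_cons, List.cons.injEq] at h
        obtain ⟨rfl, htl⟩ := h
        simp only [pvCmp, List.drop_succ_cons]
        rw [if_neg (lt_irrefl x), if_neg (lt_irrefl x)]
        exact ih u v (by simpa using hu) (by simpa using hv) htl

-- ---- the fold in B computes a maximal element ----
def pvIsMax (L : List (List Int)) (m : List Int) : Prop :=
  m ∈ L ∧ ∀ v ∈ L, pvCmp v m ≠ .gt

theorem pvBestFold_mem (h : List Int) (t : List (List Int)) : pvBestFold h t ∈ h :: t := by
  induction t generalizing h with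
  | nil => simp [pvBestFold]
  | cons v t ih =>
    have step : pvBestFold h (v :: t) = pvBestFold (if pvCmp v h = .gt then v else h) t := rfl
    rw [step]
    by_cases hc : pvCmp v h = .gt
    · rw [if_pos hc]
      rcases List.mem_cons.mp (ih v) with h1 | h1
      · rw [h1]; simp
      · exact List.mem_cons_of_mem _ (List.mem_cons_of_mem _ h1)
    · rw [if_neg hc]
      rcases List.mem_cons.mp (ih h) with h1 | h1
      · rw [h1]; simp
      · exact List.mem_cons_of_mem _ (List.mem_cons_of_mem _ h1)

theorem pvBestFold_max (h : List Int) (t : List (List Int)) :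
    pvIsMax (h :: t) (pvBestFold h t) := by
  refine ⟨pvBestFold_mem h t, ?_⟩
  induction t generalizing h with
  | nil =>
    intro v hv
    rw [List.mem_singleton.mp hv]
    simp [pvBestFold, pvCmp_refl]
  | cons w t ih =>
    intro v hv
    have step : pvBestFold h (w :: t) = pvBestFold (if pvCmp w h = .gt then w else h) t := rfl
    rw [step]
    rcases List.mem_cons.mp hv with rfl | hv'
    · -- v = h (rcases substituted h := v)
      by_cases hwh : pvCmp w v = .gt
      · rw [if_pos hwh]
        intro hcon
        exact ih w w (by simp) (pvCmp_trans_gt hwh hcon)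
      · rw [if_neg hwh]
        exact ih v v (by simp)
    · rcases List.mem_cons.mp hv' with rfl | hv''
      · -- v = w
        by_cases hwh : pvCmp v h = .gt
        · rw [if_pos hwh]
          exact ih v v (by simp)
        · rw [if_neg hwh]
          intro hcon
          have hb := pvBestFold_mem h t
          have hhb : pvCmp h (pvBestFold h t) ≠ .gt := ih h h (by simp)
          cases hcase : pvCmp h (pvBestFold h t) with
          | gt => exact hhb hcase
          | eq =>
            have : h = pvBestFold h t := (pvCmp_eq_iff _ _).mp hcase
            exact hwh (this ▸ hcon)
          | lt =>
            have : pvCmp (pvBestFold h t) h = .gt := (pvCmp_swap _ _).mpr hcase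
            exact hwh (pvCmp_trans_gt hcon this)
      · by_cases hwh : pvCmp w h = .gt
        · rw [if_pos hwh]
          exact ih w v (by simp [hv''])
        · rw [if_neg hwh]
          exact ih h v (by simp [hv''])

-- ---- pop-at-reversed-indices = filter ----
theorem pvPopAt_append_of_lt {α : Type} (xs : List α) (b : α) (i : Nat) (h : i < xs.length) :
    pvPopAt (xs ++ [b]) i = pvPopAt xs i ++ [b] := by
  unfold pvPopAt
  rw [List.take_append_of_le_length (by omega), List.drop_append_of_le_length (by omega)]
  simp

theorem pvPopAt_length {α : Type} (xs : List α) (i : Nat) (h : i < xs.length) :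
    (pvPopAt xs i).length = xs.length - 1 := by
  unfold pvPopAt; simp; omega

theorem pvFold_popAt_append {α : Type} (idxs : List Nat) (xs : List α) (b : α)
    (hb : ∀ i ∈ idxs, i < xs.length) (hp : idxs.Pairwise (· > ·)) :
    idxs.foldl pvPopAt (xs ++ [b]) = idxs.foldl pvPopAt xs ++ [b] := by
  induction idxs generalizing xs with
  | nil => simp
  | cons i rest ih =>
    have hi : i < xs.length := hb i (by simp)
    simp only [List.foldl_cons, pvPopAt_append_of_lt xs b i hi]
    apply ih
    · intro j hj
      have := (List.pairwise_cons.mp hp).1 j hj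
      rw [pvPopAt_length xs i hi]; omega
    · exact (List.pairwise_cons.mp hp).2

-- helper: second component of pvIdxs is independent of the trailing element
theorem pvIdxs_append {xs : List (String × List Int)} {b : String × List Int}
    (P : String × List Int → Bool) :
    pvIdxs (xs ++ [b]) P =
      pvIdxs xs P ++ (if P b then [xs.length] else []) := by
  unfold pvIdxs
  rw [List.length_append, List.length_singleton, List.range_succ, List.filter_append]
  congr 1
  · apply List.filter_congr
    intro i hi
    have hi' : i < xs.length := List.mem_range.mp hi
    rw [List.getD_append _ _ _ _ hi']
  · have : (xs ++ [b]).getD xs.length ("", []) = b := by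
      rw [List.getD_eq_getElem?_getD]
      simp
    rw [List.filter_cons, List.filter_nil, this]

theorem pvPopRev_eq_filter (P : String × List Int → Bool) (xs : List (String × List Int)) :
    pvPopRev xs (pvIdxs xs P) = xs.filter (fun x => !P x) := by
  induction xs using List.reverseRecOn with
  | nil => rfl
  | append_singleton ys b ih =>
    unfold pvPopRev
    rw [pvIdxs_append P, List.reverse_append, List.filter_append]
    by_cases hPb : P b
    · rw [if_pos hPb]
      simp only [List.reverse_singleton, List.singleton_append, List.foldl_cons]
      have hpop : pvPopAt (ys ++ [b]) ys.length = ys := by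
        unfold pvPopAt
        rw [List.take_append_of_le_length (le_refl _)]
        simp
      rw [hpop]
      unfold pvPopRev at ih
      rw [ih]
      simp [hPb]
    · rw [if_neg hPb]
      simp only [List.reverse_nil, List.nil_append]
      rw [pvFold_popAt_append]
      · unfold pvPopRev at ih
        rw [ih]; simp [hPb]
      · intro i hi
        have : i ∈ pvIdxs ys P := List.mem_reverse.mp hi
        unfold pvIdxs at this
        exact List.mem_range.mp (List.mem_of_mem_filter this)
      · rw [List.pairwise_reverse]
        have : (pvIdxs ys P).Pairwise (· < ·) := by
          unfold pvIdxs
          exact (List.pairwise_lt_range).filter _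
        exact this.imp (fun h => h)

-- ---- maxLen facts ----
theorem pvMaxLen_foldl_le (ps : List (String × List Int)) (a B : Nat)
    (hB : a ≤ B ∧ ∀ p ∈ ps, p.2.length ≤ B) :
    ps.foldl (fun m p => Nat.max m p.2.length) a ≤ B := by
  induction ps generalizing a with
  | nil => exact hB.1
  | cons p ps ih =>
    simp only [List.foldl_cons]
    exact ih _ ⟨Nat.max_le.mpr ⟨hB.1, hB.2 p (by simp)⟩, fun q hq => hB.2 q (by simp [hq])⟩

theorem pvMaxLen_foldl_ge (ps : List (String × List Int)) (a : Nat) :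
    a ≤ ps.foldl (fun m p => Nat.max m p.2.length) a ∧
    ∀ p ∈ ps, p.2.length ≤ ps.foldl (fun m p => Nat.max m p.2.length) a := by
  induction ps generalizing a with
  | nil => simp
  | cons p ps ih =>
    simp only [List.foldl_cons]
    obtain ⟨h1, h2⟩ := ih (Nat.max a p.2.length)
    refine ⟨le_trans (Nat.le_max_left _ _) h1, ?_⟩
    intro q hq
    rcases List.mem_cons.mp hq with rfl | hq
    · exact le_trans (Nat.le_max_right _ _) h1
    · exact h2 q hq

theorem pvMaxLen_le_of_mem {ps : List (String × List Int)} {p : String × List Int}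
    (h : p ∈ ps) : p.2.length ≤ pvMaxLen ps :=
  (pvMaxLen_foldl_ge ps 0).2 p h

theorem pvMaxLen_exists {ps : List (String × List Int)} {k : Nat}
    (h : k < pvMaxLen ps) : ∃ p ∈ ps, k < p.2.length := by
  by_contra hc
  push_neg at hc
  have := pvMaxLen_foldl_le ps 0 k ⟨by omega, fun p hp => hc p hp⟩
  unfold pvMaxLen at h
  omega

theorem pvMaxLen_sublist {ps qs : List (String × List Int)} (h : ps.Sublist qs) :
    pvMaxLen ps ≤ pvMaxLen qs := by
  apply pvMaxLen_foldl_le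
  exact ⟨Nat.zero_le _, fun p hp => pvMaxLen_le_of_mem (h.mem hp)⟩

-- ---- pvMaxInt facts ----
theorem pvMaxInt_foldl_mem (t : List Int) (a : Int) :
    t.foldl max a = a ∨ t.foldl max a ∈ t := by
  induction t generalizing a with
  | nil => simp
  | cons x t ih =>
    simp only [List.foldl_cons]
    rcases ih (max a x) with h | h
    · rw [h]
      rcases max_choice a x with h' | h' <;> simp [h']
    · simp [h]

theorem pvMaxInt_foldl_ge (t : List Int) (a : Int) :
    a ≤ t.foldl max a ∧ ∀ x ∈ t, x ≤ t.foldl max a := by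
  induction t generalizing a with
  | nil => simp
  | cons x t ih =>
    simp only [List.foldl_cons]
    obtain ⟨h1, h2⟩ := ih (max a x)
    refine ⟨le_trans (le_max_left _ _) h1, ?_⟩
    intro y hy
    rcases List.mem_cons.mp hy with rfl | hy
    · exact le_trans (le_max_right _ _) h1
    · exact h2 y hy

theorem pvMaxInt_eq {l : List Int} {M : Int} (hmem : M ∈ l) (hub : ∀ x ∈ l, x ≤ M) :
    pvMaxInt l = M := by
  cases l with
  | nil => simp at hmem
  | cons h t =>
    have hred : pvMaxInt (h :: t) = t.foldl max h := rfl
    rw [hred]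
    apply le_antisymm
    · rcases pvMaxInt_foldl_mem t h with h' | h'
      · rw [h']; exact hub h (by simp)
      · exact hub _ (by simp [h'])
    · rcases List.mem_cons.mp hmem with rfl | hmem
      · exact (pvMaxInt_foldl_ge t M).1
      · exact (pvMaxInt_foldl_ge t h).2 M hmem

-- ---- the loop invariant and the main loop lemma ----
def pvInv (index : Nat) (ps : List (String × List Int)) : Prop :=
  (∀ p ∈ ps, index ≤ p.2.length) ∧
  (∀ p ∈ ps, ∀ q ∈ ps, p.2.take index = q.2.take index)

theorem pvTake_eq_of_inv {index : Nat} {u v : List Int}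
    (hu : index ≤ u.length) (hv : index ≤ v.length) (h : u.take index = v.take index)
    (hul : u.length = index) (hvl : v.length = index) : u = v := by
  have h1 : u.take index = u := List.take_of_length_le (by omega)
  have h2 : v.take index = v := List.take_of_length_le (by omega)
  rw [h1, h2] at h
  exact h

-- a vector shorter than the max with equal prefix is strictly smaller
theorem pvCmp_exhausted {index : Nat} {u v : List Int}
    (h : u.take index = v.take index) (hul : u.length = index) (hvl : index < v.length) :
    pvCmp u v = .lt := by
  have := pvCmp_drop index u v (by omega) (by omega) h
  rw [List.drop_of_length_le (by omega)] at this
  rw [this]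
  have : v.drop index ≠ [] := by
    intro hc
    have := List.length_drop (l := v) (i := index)
    rw [hc] at this
    simp at this
    omega
  cases hd : v.drop index with
  | nil => exact absurd hd this
  | cons z zs => simp [pvCmp]

theorem pvCmp_at_index {index : Nat} {u v : List Int}
    (h : u.take index = v.take index) (hul : index < u.length) (hvl : index < v.length)
    (hlt : v.getD index 0 < u.getD index 0) : pvCmp u v = .gt := by
  rw [pvCmp_drop index u v (by omega) (by omega) h,
      List.drop_eq_getElem_cons hul, List.drop_eq_getElem_cons hvl]
  simp only [pvCmp]
  rw [List.getD_eq_getElem _ _ hul, List.getD_eq_getElem _ _ hvl] at hlt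
  rw [if_neg (by omega), if_pos hlt]

theorem pvFilterFilter {alpha : Type} (l : List alpha) (A B : alpha → Bool)
    (h : ∀ x ∈ l, B x = true → A x = true) :
    (l.filter A).filter B = l.filter B := by
  induction l with
  | nil => rfl
  | cons x l ih =>
    have ih' := ih (fun y hy => h y (List.mem_cons_of_mem _ hy))
    by_cases hB : B x = true
    · have hA : A x = true := h x (by simp) hB
      simp [List.filter_cons, hA, hB, ih']
    · by_cases hA : A x = true <;>
        simp_all [List.filter_cons, ih']

theorem pvLoop_main (fuel index : Nat) (ps : List (String × List Int)) (m : List Int)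
    (hfuel : pvMaxLen ps ≤ fuel + index)
    (hinv : pvInv index ps)
    (hmax : pvIsMax (ps.map (·.2)) m) :
    pvLoopA fuel index ps = (ps.filter (fun p => p.2 == m)).map Prod.fst := by
  induction fuel generalizing index ps with
  | zero =>
    simp only [pvLoopA]
    have hall : ∀ p ∈ ps, p.2 = m := by
      intro p hp
      obtain ⟨q, hq, hqm⟩ := List.mem_map.mp hmax.1
      have hpl : p.2.length = index :=
        le_antisymm (le_trans (pvMaxLen_le_of_mem hp) (by omega)) (hinv.1 p hp)
      have hql : q.2.length = index :=
        le_antisymm (le_trans (pvMaxLen_le_of_mem hq) (by omega)) (hinv.1 q hq)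
      rw [← hqm]
      exact pvTake_eq_of_inv (by omega) (by omega) (hinv.2 p hp q hq) hpl hql
    rw [List.filter_eq_self.mpr (fun p hp => by simp [hall p hp])]
  | succ fuel ih =>
    simp only [pvLoopA]
    by_cases hcond : index < pvMaxLen ps ∧ 1 < ps.length
    · rw [if_pos hcond]
      -- m has length > index
      obtain ⟨pm, hpm, hpm2⟩ := List.mem_map.mp hmax.1
      have hmlong : index < m.length := by
        obtain ⟨p0, hp0, hp0l⟩ := pvMaxLen_exists hcond.1
        by_contra hc
        have hml : m.length = index := le_antisymm (by omega) (hpm2 ▸ hinv.1 pm hpm)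
        have : pvCmp p0.2 m = .gt := by
          rw [pvCmp_swap]
          exact pvCmp_exhausted (by
            have := hinv.2 pm hpm p0 hp0
            rw [hpm2] at this
            exact this) hml hp0l
        exact hmax.2 p0.2 (List.mem_map_of_mem hp0) this
      rw [pvPopRev_eq_filter, pvPopRev_eq_filter]
      set P1 : String × List Int → Bool := fun p => p.2.length == index with hP1
      set ps1 := ps.filter (fun x => !P1 x) with hps1
      have hps1_mem : ∀ p ∈ ps1, p ∈ ps ∧ index < p.2.length := by
        intro p hp
        have h1 := List.mem_of_mem_filter hp
        have h2 := List.of_mem_filter hp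
        simp only [hP1, Bool.not_eq_true', beq_eq_false_iff_ne] at h2
        exact ⟨h1, lt_of_le_of_ne (hinv.1 p h1) (Ne.symm h2)⟩
      have hm_in1 : ∀ p ∈ ps, p.2 = m → p ∈ ps1 := by
        intro p hp hpmm
        refine List.mem_filter.mpr ⟨hp, ?_⟩
        simp only [hP1, Bool.not_eq_true', beq_eq_false_iff_ne]
        rw [hpmm]; omega
      have hpm_in1 : pm ∈ ps1 := hm_in1 pm hpm hpm2
      -- the max value of the current column is m's entry there
      have hub : ∀ x ∈ ps1.map (fun p => p.2.getD index 0), x ≤ m.getD index 0 := by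
        intro x hx
        obtain ⟨p, hp, rfl⟩ := List.mem_map.mp hx
        obtain ⟨hpmem, hplen⟩ := hps1_mem p hp
        by_contra hc
        push_neg at hc
        have : pvCmp p.2 m = .gt := by
          refine pvCmp_at_index ?_ hplen hmlong hc
          have := hinv.2 p hpmem pm hpm
          rw [hpm2] at this
          exact this
        exact hmax.2 p.2 (List.mem_map_of_mem hpmem) this
      have hMax : pvMaxInt (ps1.map (fun p => p.2.getD index 0)) = m.getD index 0 := by
        refine pvMaxInt_eq ?_ hub
        exact List.mem_map.mpr ⟨pm, hpm_in1, by rw [hpm2]⟩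
      rw [hMax]
      set P2 : String × List Int → Bool := fun p => decide (p.2.getD index 0 < m.getD index 0) with hP2
      set ps2 := ps1.filter (fun x => !P2 x) with hps2
      have hps2_mem : ∀ p ∈ ps2, p ∈ ps1 ∧ p.2.getD index 0 = m.getD index 0 := by
        intro p hp
        have h1 := List.mem_of_mem_filter hp
        have h2 := List.of_mem_filter hp
        simp only [hP2, Bool.not_eq_true', decide_eq_false_iff_not, not_lt] at h2
        exact ⟨h1, le_antisymm (hub _ (List.mem_map_of_mem h1)) h2⟩
      have hm_in2 : ∀ p ∈ ps1, p.2 = m → p ∈ ps2 := by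
        intro p hp hpmm
        refine List.mem_filter.mpr ⟨hp, ?_⟩
        simp only [hP2, Bool.not_eq_true', decide_eq_false_iff_not, not_lt]
        rw [hpmm]
      have hsub2 : ps2.Sublist ps := List.Sublist.trans List.filter_sublist List.filter_sublist
      -- apply the induction hypothesis at index+1
      rw [ih (index + 1) ps2]
      · -- the two filters agree with filtering ps directly by (· = m)
        have step2 : ps2.filter (fun p => p.2 == m) = ps1.filter (fun p => p.2 == m) := by
          rw [hps2]
          apply pvFilterFilter
          intro p _ hpB
          have hpe : p.2 = m := by simpa using hpB
          simp only [hP2, Bool.not_eq_true', decide_eq_false_iff_not, not_lt, hpe]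
          exact le_refl _
        have step1 : ps1.filter (fun p => p.2 == m) = ps.filter (fun p => p.2 == m) := by
          rw [hps1]
          apply pvFilterFilter
          intro p _ hpB
          have hpe : p.2 = m := by simpa using hpB
          simp only [hP1, Bool.not_eq_true', beq_eq_false_iff_ne, hpe]
          omega
        rw [step2, step1]
      · -- fuel
        have := pvMaxLen_sublist hsub2
        omega
      · -- invariant at index+1
        constructor
        · intro p hp
          exact (hps1_mem p (hps2_mem p hp).1).2
        · intro p hp q hq
          obtain ⟨hp1, hpv⟩ := hps2_mem p hp
          obtain ⟨hq1, hqv⟩ := hps2_mem q hq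
          obtain ⟨hpmem, hplen⟩ := hps1_mem p hp1
          obtain ⟨hqmem, hqlen⟩ := hps1_mem q hq1
          rw [List.take_succ, List.take_succ]
          rw [hinv.2 p hpmem q hqmem]
          congr 1
          rw [List.getElem?_eq_getElem hplen, List.getElem?_eq_getElem hqlen]
          simp only [Option.toList_some]
          rw [← List.getD_eq_getElem _ 0 hplen, ← List.getD_eq_getElem _ 0 hqlen, hpv, hqv]
      · -- m is still maximal
        refine ⟨?_, ?_⟩
        · exact List.mem_map.mpr ⟨pm, hm_in2 pm hpm_in1 hpm2, hpm2⟩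
        · intro v hv
          obtain ⟨p, hp, rfl⟩ := List.mem_map.mp hv
          exact hmax.2 p.2 (List.mem_map_of_mem (hsub2.mem hp))
    · rw [if_neg hcond]
      have hall : ∀ p ∈ ps, p.2 = m := by
        rw [not_and_or, not_lt] at hcond
        rcases hcond with hle | hlen
        · intro p hp
          obtain ⟨q, hq, hqm⟩ := List.mem_map.mp hmax.1
          have hpl : p.2.length = index :=
            le_antisymm (le_trans (pvMaxLen_le_of_mem hp) hle) (hinv.1 p hp)
          have hql : q.2.length = index :=
            le_antisymm (le_trans (pvMaxLen_le_of_mem hq) hle) (hinv.1 q hq)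
          rw [← hqm]
          exact pvTake_eq_of_inv (by omega) (by omega) (hinv.2 p hp q hq) hpl hql
        · push_neg at hlen
          match ps, hlen with
          | [], _ => intro p hp; simp at hp
          | [p0], _ =>
            intro p hp
            rw [List.mem_singleton] at hp
            subst hp
            have := hmax.1
            simp at this
            exact this.symm
      rw [List.filter_eq_self.mpr (fun p hp => by simp [hall p hp])]

-- map-build-pairs plumbing for the top-level theorem
theorem pvPairs_filter_map (aa : List String) (f : String → List Int) (g : List Int → Bool) :
    (((aa.map (fun a => (a, f a))).filter (fun p => g p.2)).map Prod.fst) =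
      aa.filter (fun a => g (f a)) := by
  induction aa with
  | nil => rfl
  | cons a aa ih =>
    simp only [List.map_cons, List.filter_cons]
    by_cases h : g (f a)
    · simp only [h, if_pos, List.map_cons, ih]
    · simp only [h, Bool.false_eq_true, if_neg, ih, not_false_eq_true]

-- ===== VERDICT (by name: the statement is the Claim_ definition above) =====
theorem getBestActions_spec : Claim_equal_getBestActions := by
  unfold Claim_equal_getBestActions
  intro evaluation all_actions _ hpre
  unfold Spec_getBestActions
  obtain ⟨hne, -⟩ := hpre
  cases all_actions with
  | nil => exact absurd rfl hne
  | cons a0 rest =>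
    set f : String → List Int := fun a => (pvLookup evaluation a).getD [] with hf
    set best := pvBestFold (f a0) (rest.map f) with hbest
    have hA : getBestActions evaluation (a0 :: rest) =
        pvLoopA (pvMaxLen ((a0 :: rest).map (fun a => (a, f a)))) 0
          ((a0 :: rest).map (fun a => (a, f a))) := rfl
    have hB : getBestActions_alt evaluation (a0 :: rest) =
        (a0 :: rest).filter (fun a => f a == best) := rfl
    rw [hA, hB]
    have hmapeq : (((a0 :: rest).map (fun a => (a, f a))).map (·.2)) = f a0 :: rest.map f := by
      rw [List.map_map]
      rfl
    rw [pvLoop_main _ 0 _ best (by omega) ⟨fun p _ => Nat.zero_le _, fun p _ q _ => rfl⟩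
        (by rw [hmapeq]; exact pvBestFold_max (f a0) (rest.map f))]
    exact pvPairs_filter_map (a0 :: rest) f (fun v => v == best)
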